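-- pv_equiv track=rewrite | github.com/mo124121/atcoder-activity | gcj/2022/round1c/1.py | check
-- ===== SOURCE A (Python) =====
-- def check(tower):
--     occur = set()
--     occur.add(tower[0])
--     for i in range(len(tower) - 1):
--         if tower[i + 1] in occur and tower[i + 1] != tower[i]:
--             return False
--         occur.add(tower[i + 1])
--     return True
-- ===== SOURCE B (Python) =====
-- def check(tower):
--     # Run keys: the first element plus every element that differs from its
--     # left neighbour; the tower is valid iff no run key repeats.
--     keys = [tower[0]] + [b for a, b in zip(tower, tower[1:]) if b != a]
--     return len(keys) == len(set(keys))
-- ===== Notes on version B (the rewrite author's own statement) =====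
-- stated objective: simpler
-- what changed: B builds the run-key sequence in one zip-with-left-neighbour comprehension and then does a single uniqueness check (len == len(set)), instead of A's stateful loop with an interleaved membership test and early return.
import Mathlib
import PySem

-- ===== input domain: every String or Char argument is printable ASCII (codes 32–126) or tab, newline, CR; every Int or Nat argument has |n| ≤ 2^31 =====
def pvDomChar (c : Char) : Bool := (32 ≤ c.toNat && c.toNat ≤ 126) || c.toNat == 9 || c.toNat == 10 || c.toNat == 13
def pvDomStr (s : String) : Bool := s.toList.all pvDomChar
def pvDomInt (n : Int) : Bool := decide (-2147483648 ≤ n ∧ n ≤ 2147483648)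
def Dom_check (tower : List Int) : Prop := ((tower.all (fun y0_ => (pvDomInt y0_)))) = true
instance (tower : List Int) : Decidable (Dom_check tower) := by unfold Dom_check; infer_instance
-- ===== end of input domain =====

-- B builds the run-key list by a zip-with-left-neighbour comprehension and then does
-- one uniqueness check, instead of A's stateful loop with membership test and early return.

-- ===== PORT A =====
-- the for-loop: state is (prev = tower[i], occur); the if/early-return stays in order
def checkGo : List Int → Int → PySem.Set Int → Bool
  | [], _, _ => true
  | x :: xs, prev, occur =>
    if PySem.Set.contains occur x && x != prev then false
    else checkGo xs x (PySem.Set.add occur x)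

def check (tower : List Int) : Bool :=
  match tower with
  | [] => false   -- tower[0] raises IndexError in Python; excluded by Pre_check
  | t0 :: rest => checkGo rest t0 (PySem.Set.add PySem.Set.empty t0)

-- ===== PORT B =====
def check_alt (tower : List Int) : Bool :=
  match tower with
  | [] => false   -- tower[0] raises IndexError in Python; excluded by Pre_check
  | t0 :: rest =>
    -- [tower[0]] + [b for a, b in zip(tower, tower[1:]) if b != a]
    let keys := t0 :: (((t0 :: rest).zip rest).filterMap
      (fun p => if p.2 != p.1 then some p.2 else none))
    keys.length == (PySem.Set.ofList keys).length   -- len(keys) == len(set(keys))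

-- ===== PRECONDITION & SPEC =====
-- Pre_ excludes only the empty list, on which both A and B raise IndexError (tower[0]).
def Pre_check (tower : List Int) : Prop := tower ≠ []
instance (tower : List Int) : Decidable (Pre_check tower) := by unfold Pre_check; infer_instance
def pvWitness_check : List Int := [1, 2, 1]

def Spec_check (tower : List Int) (out : Bool) : Prop := out = check_alt tower
instance (tower : List Int) (out : Bool) : Decidable (Spec_check tower out) := by unfold Spec_check; infer_instance

-- ===== CLAIM (what is proved, stated in full; the proofs are below) =====
def Claim_equal_check : Prop := ∀ (tower : List Int), Dom_check tower → Pre_check tower → Spec_check tower (check tower)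

-- ===== LEMMAS AND PROOFS =====

-- proof-only abstraction: the run keys after the first element
def runsGo : List Int → Int → List Int
  | [], _ => []
  | x :: xs, prev => if x != prev then x :: runsGo xs x else runsGo xs prev

theorem set_add_of_mem (s : PySem.Set Int) (x : Int) (h : x ∈ s) :
    PySem.Set.add s x = s := by
  simp [PySem.Set.add, h]

theorem set_add_of_not_mem (s : PySem.Set Int) (x : Int) (h : x ∉ s) :
    PySem.Set.add s x = s ++ [x] := by
  simp [PySem.Set.add, h]

-- A's loop returns true iff the remaining run keys are distinct and avoid `occur`.
theorem checkGo_iff (xs : List Int) : ∀ (prev : Int) (occur : PySem.Set Int),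
    prev ∈ occur →
    (checkGo xs prev occur = true ↔
      (runsGo xs prev).Nodup ∧ ∀ k ∈ runsGo xs prev, k ∉ occur) := by
  induction xs with
  | nil => simp [checkGo, runsGo]
  | cons x xs ih =>
    intro prev occur hprev
    by_cases hxp : x = prev
    · subst hxp
      simp [checkGo, runsGo, set_add_of_mem occur x hprev, ih x occur hprev]
    · by_cases hin : x ∈ occur
      · have h0 : checkGo (x :: xs) prev occur = false := by
          simp [checkGo, hin, hxp]
        rw [h0]
        simp only [runsGo, if_pos (by simp [hxp] : (x != prev) = true)]
        constructor
        · intro h; cases h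
        · rintro ⟨-, hall⟩
          exact absurd hin (hall x (by simp))
      · have h1 : checkGo (x :: xs) prev occur = checkGo xs x (occur ++ [x]) := by
          simp [checkGo, hin]
        rw [h1, ih x (occur ++ [x]) (by simp)]
        simp only [runsGo, if_pos (by simp [hxp] : (x != prev) = true),
          List.nodup_cons, List.mem_append, List.mem_cons, List.not_mem_nil, or_false]
        constructor
        · rintro ⟨hnd, hall⟩
          refine ⟨⟨fun hx => (hall x hx) (Or.inr rfl), hnd⟩, ?_⟩
          rintro k (rfl | hk)
          · exact hin
          · exact fun hko => (hall k hk) (Or.inl hko)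
        · rintro ⟨⟨hnx, hnd⟩, hall⟩
          refine ⟨hnd, fun k hk => ?_⟩
          rintro (hko | rfl)
          · exact (hall k (Or.inr hk)) hko
          · exact hnx hk

theorem foldl_add_len_le (l : List Int) : ∀ (s : PySem.Set Int),
    (l.foldl PySem.Set.add s).length ≤ s.length + l.length := by
  induction l with
  | nil => simp
  | cons x xs ih =>
    intro s
    have h := ih (PySem.Set.add s x)
    have hlen : (PySem.Set.add s x).length ≤ s.length + 1 := by
      by_cases hin : x ∈ s
      · rw [set_add_of_mem s x hin]; omega
      · rw [set_add_of_not_mem s x hin]; simp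
    simp only [List.foldl_cons, List.length_cons]
    omega

-- folding Set.add grows the length by the list length iff the list is fresh and duplicate-free
theorem foldl_add_len_iff (l : List Int) : ∀ (s : PySem.Set Int),
    ((l.foldl PySem.Set.add s).length = s.length + l.length) ↔
      (l.Nodup ∧ ∀ x ∈ l, x ∉ s) := by
  induction l with
  | nil => simp
  | cons x xs ih =>
    intro s
    by_cases hin : x ∈ s
    · have hle := foldl_add_len_le xs s
      rw [List.foldl_cons, set_add_of_mem s x hin]
      simp only [List.length_cons]
      constructor
      · intro h; omega
      · rintro ⟨-, hall⟩
        exact absurd hin (hall x (by simp))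
    · rw [List.foldl_cons, set_add_of_not_mem s x hin]
      have ih' := ih (s ++ [x])
      simp only [List.length_append, List.length_cons, List.length_nil,
        List.mem_append, List.mem_cons, List.not_mem_nil, or_false, not_or] at ih' ⊢
      simp only [List.nodup_cons]
      constructor
      · intro h
        obtain ⟨hnd, hall⟩ := ih'.mp (by omega)
        refine ⟨⟨fun hx => (hall x hx).2 rfl, hnd⟩, ?_⟩
        rintro k (rfl | hk)
        · exact hin
        · exact (hall k hk).1
      · rintro ⟨⟨hnx, hnd⟩, hall⟩
        have := ih'.mpr ⟨hnd, fun k hk => ⟨hall k (Or.inr hk), fun hke => hnx (hke ▸ hk)⟩⟩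
        omega

theorem ofList_len_iff (l : List Int) :
    ((PySem.Set.ofList l).length = l.length) ↔ l.Nodup := by
  rw [PySem.Set.ofList_eq_foldl]
  have h := foldl_add_len_iff l []
  simp only [List.length_nil, Nat.zero_add, List.not_mem_nil, not_false_iff,
    implies_true, and_true] at h
  exact h

-- B's zip-with-left-neighbour comprehension computes exactly the run keys
theorem zip_filterMap_eq_runsGo (xs : List Int) : ∀ (prev : Int),
    ((prev :: xs).zip xs).filterMap
      (fun p : Int × Int => if p.2 != p.1 then some p.2 else none) = runsGo xs prev := by
  induction xs with
  | nil => intro prev; simp [runsGo]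
  | cons x xs ih =>
    intro prev
    simp only [List.zip_cons_cons, List.filterMap_cons]
    by_cases hxp : x = prev
    · subst hxp
      simpa [runsGo] using ih x
    · have hb : (x != prev) = true := by simp [hxp]
      simpa [runsGo, hb] using ih x

theorem check_alt_iff (t0 : Int) (rest : List Int) :
    check_alt (t0 :: rest) = true ↔ (t0 :: runsGo rest t0).Nodup := by
  simp only [check_alt, beq_iff_eq, zip_filterMap_eq_runsGo]
  rw [eq_comm, ofList_len_iff]

theorem check_iff (t0 : Int) (rest : List Int) :
    check (t0 :: rest) = true ↔ (t0 :: runsGo rest t0).Nodup := by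
  have hocc : PySem.Set.add PySem.Set.empty t0 = [t0] := by
    simp [PySem.Set.add, PySem.Set.empty]
  rw [show check (t0 :: rest) = checkGo rest t0 (PySem.Set.add PySem.Set.empty t0) from rfl,
    hocc, checkGo_iff rest t0 [t0] (by simp)]
  simp only [List.nodup_cons, List.mem_cons, List.not_mem_nil, or_false]
  constructor
  · rintro ⟨hnd, hall⟩
    exact ⟨fun hx => (hall t0 hx) rfl, hnd⟩
  · rintro ⟨hnx, hnd⟩
    exact ⟨hnd, fun k hk hke => hnx (hke ▸ hk)⟩

-- ===== VERDICT (by name: the statement is the Claim_ definition above) =====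
theorem check_spec : Claim_equal_check := by
  intro tower _ hpre
  unfold Spec_check
  match tower with
  | [] => exact absurd rfl hpre
  | t0 :: rest =>
    rw [Bool.eq_iff_iff, check_iff, check_alt_iff]
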